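-- pv_equiv track=rewrite | github.com/Nelzouki22/zoo | zoo/zoo.py | is_similar_to_zoo
-- ===== SOURCE A (Python) =====
-- def is_similar_to_zoo(word):
--     # تحقق من أن الكلمة تبدأ بحروف Z ثم حروف O
--     if not word.startswith('z'):
--         return "No"
--
--     # حساب عدد حروف Z و O
--     count_z = 0
--     count_o = 0
--
--     # عد عدد حروف Z
--     while count_z < len(word) and word[count_z] == 'z':
--         count_z += 1
--
--     # عد عدد حروف O
--     while count_o < len(word) - count_z and word[count_z + count_o] == 'o':
--         count_o += 1
--
--     # تحقق من أن كل الأحرف بعد حروف Z هي حروف O فقط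
--     if count_z + count_o == len(word) and count_o >= count_z:
--         return "Yes"
--     else:
--         return "No"
-- ===== SOURCE B (Python) =====
-- def is_similar_to_zoo(word):
--     # same initial guard as A, so non-strings raise AttributeError identically
--     if not word.startswith('z'):
--         return "No"
--     if 'oz' in word:
--         return "No"
--     balance = 0
--     for c in word:
--         if c == 'z':
--             balance -= 1
--         elif c == 'o':
--             balance += 1
--         else:
--             return "No"
--     return "Yes" if balance >= 0 else "No"
-- ===== Notes on version B (the rewrite author's own statement) =====
-- stated objective: alternative
-- what changed: Replaces A's run segmentation (two index-counting while-loops plus the run-length arithmetic check) with a forbidden-substring test ('oz' in word) and a single fold over all characters that maintains an o-minus-z balance and rejects any other character; no run boundaries are ever computed.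
import Mathlib
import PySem

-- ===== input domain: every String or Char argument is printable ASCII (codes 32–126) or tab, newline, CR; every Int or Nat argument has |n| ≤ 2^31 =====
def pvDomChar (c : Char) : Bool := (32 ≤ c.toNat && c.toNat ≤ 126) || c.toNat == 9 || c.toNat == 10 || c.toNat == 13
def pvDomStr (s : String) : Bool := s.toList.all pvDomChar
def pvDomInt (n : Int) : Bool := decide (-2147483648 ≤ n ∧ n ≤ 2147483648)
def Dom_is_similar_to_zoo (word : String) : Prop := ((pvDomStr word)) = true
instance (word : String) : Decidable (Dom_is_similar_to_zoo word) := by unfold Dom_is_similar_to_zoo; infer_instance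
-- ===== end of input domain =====

-- B replaces A's two run-counting while-loops by a forbidden-substring test plus a single
-- balance-accumulator pass over all characters; objective: alternative (same cost).

-- ===== PORT A =====
-- while count_z < len(word) and word[count_z] == 'z': count_z += 1
def pvLoopZ (cs : List Char) (i : Nat) : Nat :=
  if h : i < cs.length ∧ cs.getD i ' ' = 'z' then pvLoopZ cs (i + 1) else i
termination_by cs.length - i
decreasing_by omega

-- while count_o < len(word) - count_z and word[count_z + count_o] == 'o': count_o += 1
def pvLoopO (cs : List Char) (cz : Nat) (j : Nat) : Nat :=
  if h : j < cs.length - cz ∧ cs.getD (cz + j) ' ' = 'o' then pvLoopO cs cz (j + 1) else j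
termination_by cs.length - cz - j
decreasing_by omega

def is_similar_to_zoo (word : String) : String :=
  if (PySem.Str.startswith word "z") = false then "No"
  else
    let cs := word.toList
    let count_z := pvLoopZ cs 0
    let count_o := pvLoopO cs count_z 0
    if count_z + count_o = cs.length ∧ count_o ≥ count_z then "Yes" else "No"

-- ===== PORT B =====
-- the 'for c in word' loop: returns none where Source B hits the early 'return "No"' on a foreign char
def pvBalance (cs : List Char) (b : Int) : Option Int :=
  match cs with
  | [] => some b
  | c :: t =>
    if c = 'z' then pvBalance t (b - 1)
    else if c = 'o' then pvBalance t (b + 1)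
    else none

def is_similar_to_zoo_alt (word : String) : String :=
  if (PySem.Str.startswith word "z") = false then "No"
  else if PySem.Str.isIn "oz" word then "No"
  else
    match pvBalance word.toList 0 with
    | none => "No"
    | some bal => if bal ≥ 0 then "Yes" else "No"

-- ===== PRECONDITION & SPEC =====
def Spec_is_similar_to_zoo (word : String) (out : String) : Prop := out = is_similar_to_zoo_alt word
instance (word : String) (out : String) : Decidable (Spec_is_similar_to_zoo word out) := by unfold Spec_is_similar_to_zoo; infer_instance

-- ===== CLAIM (what is proved, stated in full; the proofs are below) =====
def Claim_equal_is_similar_to_zoo : Prop := ∀ (word : String), Dom_is_similar_to_zoo word → Spec_is_similar_to_zoo word (is_similar_to_zoo word)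

-- ===== LEMMAS AND PROOFS =====

theorem pvLoopZ_eq (cs : List Char) (i : Nat) :
    pvLoopZ cs i = i + ((cs.drop i).takeWhile (· == 'z')).length := by
  fun_induction pvLoopZ cs i with
  | case1 i h ih =>
    have hlt := h.1
    have hget : cs[i] = 'z' := by
      have h2 := h.2
      rwa [List.getD_eq_getElem?_getD, List.getElem?_eq_getElem hlt, Option.getD_some] at h2
    rw [ih, List.drop_eq_getElem_cons hlt]
    simp [hget]
    omega
  | case2 i h =>
    push Not at h
    by_cases hlt : i < cs.length
    · have hne : cs[i] ≠ 'z' := by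
        intro hz
        apply h hlt
        rw [List.getD_eq_getElem?_getD, List.getElem?_eq_getElem hlt, Option.getD_some, hz]
      rw [List.drop_eq_getElem_cons hlt]
      simp [hne]
    · rw [List.drop_eq_nil_of_le (by omega)]
      simp

theorem pvLoopO_eq (cs : List Char) (cz j : Nat) :
    pvLoopO cs cz j = j + ((cs.drop (cz + j)).takeWhile (· == 'o')).length := by
  fun_induction pvLoopO cs cz j with
  | case1 j h ih =>
    have hlt : cz + j < cs.length := by omega
    have hget : cs[cz + j] = 'o' := by
      have h2 := h.2
      rwa [List.getD_eq_getElem?_getD, List.getElem?_eq_getElem hlt, Option.getD_some] at h2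
    rw [ih, List.drop_eq_getElem_cons hlt]
    have : cz + (j + 1) = cz + j + 1 := by omega
    rw [this]
    simp [hget]
    omega
  | case2 j h =>
    push Not at h
    by_cases hlt : cz + j < cs.length
    · have hj : j < cs.length - cz := by omega
      have hne : cs[cz + j] ≠ 'o' := by
        intro hz
        apply h hj
        rw [List.getD_eq_getElem?_getD, List.getElem?_eq_getElem hlt, Option.getD_some, hz]
      rw [List.drop_eq_getElem_cons hlt]
      simp [hne]
    · rw [List.drop_eq_nil_of_le (by omega)]
      simp

theorem pv_drop_takeWhile_length {α : Type} (p : α → Bool) (l : List α) :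
    l.drop (l.takeWhile p).length = l.dropWhile p := by
  nth_rewrite 2 [← List.takeWhile_append_dropWhile (p := p) (l := l)]
  rw [List.drop_left]

theorem pv_length_split {α : Type} (p : α → Bool) (l : List α) :
    (l.takeWhile p).length + (l.dropWhile p).length = l.length := by
  conv_rhs => rw [← List.takeWhile_append_dropWhile (p := p) (l := l)]
  rw [List.length_append]

-- "good shape": the word is a block of 'z' followed by a block of 'o'
def pvGood (cs : List Char) : Prop :=
  ∃ a b : Nat, cs = List.replicate a 'z' ++ List.replicate b 'o'

-- computations on the good shape
theorem pv_takeWhile_good (a b : Nat) :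
    (List.replicate a 'z' ++ List.replicate b 'o').takeWhile (· == 'z') = List.replicate a 'z' := by
  induction a with
  | zero =>
    cases b with
    | zero => simp
    | succ b' => simp [List.replicate_succ]
  | succ a' ih => simp [List.replicate_succ, ih]

theorem pv_dropWhile_good (a b : Nat) :
    (List.replicate a 'z' ++ List.replicate b 'o').dropWhile (· == 'z') = List.replicate b 'o' := by
  induction a with
  | zero =>
    cases b with
    | zero => simp
    | succ b' => simp [List.replicate_succ]
  | succ a' ih => simp [List.replicate_succ, ih]

theorem pv_takeWhile_rep_o (b : Nat) :
    (List.replicate b 'o').takeWhile (· == 'o') = List.replicate b 'o' := by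
  induction b with
  | zero => simp
  | succ b' ih => simp [List.replicate_succ, ih]

theorem pvBalance_rep_o (b : Nat) (k : Int) :
    pvBalance (List.replicate b 'o') k = some (k + b) := by
  induction b generalizing k with
  | zero => simp [pvBalance]
  | succ b' ih =>
    have hstep : pvBalance (List.replicate (b' + 1) 'o') k
        = pvBalance (List.replicate b' 'o') (k + 1) := by
      rw [List.replicate_succ]
      simp [pvBalance]
    rw [hstep, ih]
    congr 1
    push_cast
    ring

theorem pvBalance_good (a b : Nat) :
    pvBalance (List.replicate a 'z' ++ List.replicate b 'o') 0 = some ((b : Int) - a) := by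
  suffices h : ∀ (a : Nat) (k : Int),
      pvBalance (List.replicate a 'z' ++ List.replicate b 'o') k = some (k + b - a) by
    have := h a 0
    rw [this]
    simp only [Option.some.injEq]
    ring
  intro a
  induction a with
  | zero => intro k; simp [pvBalance_rep_o]
  | succ a' ih =>
    intro k
    have hstep : pvBalance (List.replicate (a' + 1) 'z' ++ List.replicate b 'o') k
        = pvBalance (List.replicate a' 'z' ++ List.replicate b 'o') (k - 1) := by
      rw [List.replicate_succ, List.cons_append]
      simp [pvBalance]
    rw [hstep, ih]
    congr 1
    push_cast
    ring

-- no 'oz' occurs in the good shape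
theorem pv_no_oz_rep_o (b : Nat) : ¬ (['o', 'z'] <:+: List.replicate b 'o') := by
  induction b with
  | zero => decide
  | succ b' ih =>
    rw [List.replicate_succ, List.infix_cons_iff]
    rintro (hpre | hinf)
    · rcases List.cons_prefix_cons.mp hpre with ⟨-, hpre2⟩
      cases b' with
      | zero => simp at hpre2
      | succ b'' =>
        rw [List.replicate_succ] at hpre2
        rcases List.cons_prefix_cons.mp hpre2 with ⟨hz, -⟩
        exact absurd hz (by decide)
    · exact ih hinf

theorem pv_no_oz_good (a b : Nat) :
    ¬ (['o', 'z'] <:+: List.replicate a 'z' ++ List.replicate b 'o') := by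
  induction a with
  | zero => simpa using pv_no_oz_rep_o b
  | succ a' ih =>
    rw [List.replicate_succ, List.cons_append, List.infix_cons_iff]
    rintro (hpre | hinf)
    · rcases List.cons_prefix_cons.mp hpre with ⟨hoz, -⟩
      exact absurd hoz (by decide)
    · exact ih hinf

-- a character outside {z,o} drives the balance loop to none (Source B's early return)
theorem pvBalance_none_of_bad (cs : List Char) (c : Char) (hc : c ∈ cs)
    (hz : c ≠ 'z') (ho : c ≠ 'o') : ∀ k : Int, pvBalance cs k = none := by
  induction cs with
  | nil => cases hc
  | cons d t ih =>
    intro k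
    rcases List.mem_cons.mp hc with rfl | hmem
    · simp [pvBalance, hz, ho]
    · by_cases hd : d = 'z'
      · simp [pvBalance, hd, ih hmem]
      · by_cases hd' : d = 'o'
        · simp [pvBalance, hd', ih hmem]
        · simp [pvBalance, hd, hd']

-- all chars in {z,o} and no adjacent "oz" → the word has the good shape
theorem pv_good_of_clean (cs : List Char)
    (hall : ∀ c ∈ cs, c = 'z' ∨ c = 'o')
    (hoz : ¬ (['o', 'z'] <:+: cs)) : pvGood cs := by
  induction cs with
  | nil => exact ⟨0, 0, rfl⟩
  | cons c t ih =>
    have hoz_t : ¬ (['o', 'z'] <:+: t) := fun h => hoz (List.infix_cons_iff.mpr (Or.inr h))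
    have hall_t : ∀ d ∈ t, d = 'z' ∨ d = 'o' := fun d hd => hall d (List.mem_cons_of_mem _ hd)
    rcases ih hall_t hoz_t with ⟨a, b, hab⟩
    rcases hall c (List.mem_cons_self) with rfl | rfl
    · exact ⟨a + 1, b, by rw [hab, List.replicate_succ, List.cons_append]⟩
    · -- head 'o': the z-block of t must be empty, else "oz" is a prefix
      cases a with
      | zero =>
        exact ⟨0, b + 1, by rw [hab]; simp [List.replicate_succ]⟩
      | succ a' =>
        exfalso
        apply hoz
        apply List.IsPrefix.isInfix
        rw [hab, List.replicate_succ, List.cons_append]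
        exact List.cons_prefix_cons.mpr ⟨rfl, List.cons_prefix_cons.mpr ⟨rfl, List.nil_prefix⟩⟩

-- A's loops cover the whole word iff the word has the good shape
theorem pv_good_of_tail_nil (cs : List Char)
    (h : (cs.dropWhile (· == 'z')).dropWhile (· == 'o') = []) : pvGood cs := by
  refine ⟨(cs.takeWhile (· == 'z')).length, ((cs.dropWhile (· == 'z')).takeWhile (· == 'o')).length, ?_⟩
  have h1 : cs.takeWhile (· == 'z') = List.replicate (cs.takeWhile (· == 'z')).length 'z' := by
    rw [List.eq_replicate_iff]
    exact ⟨rfl, fun c hc => by simpa using List.mem_takeWhile_imp hc⟩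
  have h2 : (cs.dropWhile (· == 'z')).takeWhile (· == 'o')
      = List.replicate ((cs.dropWhile (· == 'z')).takeWhile (· == 'o')).length 'o' := by
    rw [List.eq_replicate_iff]
    exact ⟨rfl, fun c hc => by simpa using List.mem_takeWhile_imp hc⟩
  conv_lhs => rw [← List.takeWhile_append_dropWhile (p := (· == 'z')) (l := cs)]
  rw [← h1, ← h2]
  congr 1
  conv_lhs => rw [← List.takeWhile_append_dropWhile (p := (· == 'o')) (l := cs.dropWhile (· == 'z'))]
  rw [h, List.append_nil]

-- ===== VERDICT (by name: the statement is the Claim_ definition above) =====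
theorem is_similar_to_zoo_spec : Claim_equal_is_similar_to_zoo := by
  intro word _
  unfold Spec_is_similar_to_zoo is_similar_to_zoo is_similar_to_zoo_alt
  cases hs : PySem.Str.startswith word "z" with
  | false => simp
  | true =>
    simp only [Bool.true_eq_false, if_false]
    set cs := word.toList with hcs
    have hz : pvLoopZ cs 0 = (cs.takeWhile (· == 'z')).length := by
      simpa using pvLoopZ_eq cs 0
    have hrest : cs.drop (cs.takeWhile (· == 'z')).length = cs.dropWhile (· == 'z') :=
      pv_drop_takeWhile_length _ _
    have ho : pvLoopO cs (pvLoopZ cs 0) 0 =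
        ((cs.dropWhile (· == 'z')).takeWhile (· == 'o')).length := by
      have h1 := pvLoopO_eq cs (pvLoopZ cs 0) 0
      rw [h1, hz]
      simp [hrest]
    have hoz_list : ("oz" : String).toList = ['o', 'z'] := by decide
    by_cases hGood : pvGood cs
    · rcases hGood with ⟨a, b, hab⟩
      have hzz : pvLoopZ cs 0 = a := by
        rw [hz, hab, pv_takeWhile_good, List.length_replicate]
      have hoo : pvLoopO cs (pvLoopZ cs 0) 0 = b := by
        rw [ho, hab, pv_dropWhile_good, pv_takeWhile_rep_o, List.length_replicate]
      have hlen : cs.length = a + b := by rw [hab]; simp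
      have hin : PySem.Str.isIn "oz" word = false := by
        rw [← Bool.not_eq_true, PySem.Str.isIn_iff_infix, hoz_list, ← hcs, hab]
        exact pv_no_oz_good a b
      have hbal : pvBalance cs 0 = some ((b : Int) - a) := by rw [hab]; exact pvBalance_good a b
      rw [hoo, hzz, hin, hbal]
      simp only [Bool.false_eq_true, if_false]
      by_cases hba : b ≥ a
      · rw [if_pos ⟨by omega, hba⟩, if_pos (by omega)]
      · rw [if_neg (fun hc => hba hc.2), if_neg (by omega)]
    · have hA : ¬ (pvLoopZ cs 0 + pvLoopO cs (pvLoopZ cs 0) 0 = cs.length ∧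
          pvLoopO cs (pvLoopZ cs 0) 0 ≥ pvLoopZ cs 0) := by
        rintro ⟨hsum, -⟩
        apply hGood
        apply pv_good_of_tail_nil
        have l1 := pv_length_split (· == 'z') cs
        have l2 := pv_length_split (· == 'o') (cs.dropWhile (· == 'z'))
        rw [ho, hz] at hsum
        have : ((cs.dropWhile (· == 'z')).dropWhile (· == 'o')).length = 0 := by omega
        exact List.eq_nil_of_length_eq_zero this
      rw [if_neg hA]
      by_cases hin : PySem.Str.isIn "oz" word = true
      · rw [hin]
        simp
      · rw [Bool.not_eq_true] at hin
        rw [hin]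
        simp only [Bool.false_eq_true, if_false]
        have hninf : ¬ (['o', 'z'] <:+: cs) := by
          intro h
          have ht : PySem.Str.isIn "oz" word = true :=
            (PySem.Str.isIn_iff_infix "oz" word).mpr (by rw [hoz_list]; exact h)
          rw [hin] at ht
          exact Bool.false_ne_true ht
        by_cases hall : ∀ c ∈ cs, c = 'z' ∨ c = 'o'
        · exact absurd (pv_good_of_clean cs hall hninf) hGood
        · push Not at hall
          rcases hall with ⟨c, hmem, hcz, hco⟩
          rw [pvBalance_none_of_bad cs c hmem hcz hco 0]
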